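-- pv_equiv track=rewrite | github.com/delta-jrm/Gromark | gromark-solver-gui.py | generate_mixed_alphabet
-- ===== SOURCE A (Python) =====
-- import string
--
-- def generate_mixed_alphabet(keyword):
--     keyword = ''.join(sorted(set(keyword.upper()), key=keyword.index))
--     base_alphabet = ''.join(sorted(set(string.ascii_uppercase) - set(keyword)))
--     combined = keyword + base_alphabet
--
--     num_cols = len(keyword)
--     grid = [combined[i:i+num_cols] for i in range(0, len(combined), num_cols)]
--
--     keyword_order = sorted([(char, idx) for idx, char in enumerate(keyword)])
--     column_order = [idx for _, idx in keyword_order]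
--
--     mixed_alphabet = ''
--     for idx in column_order:
--         for row in grid:
--             if idx < len(row):
--                 mixed_alphabet += row[idx]
--     return mixed_alphabet
-- ===== SOURCE B (Python) =====
-- import string
--
-- def generate_mixed_alphabet(keyword):
--     keyword = ''.join(sorted(set(keyword.upper()), key=keyword.index))
--     base_alphabet = ''.join(sorted(set(string.ascii_uppercase) - set(keyword)))
--     combined = keyword + base_alphabet
--
--     num_cols = len(keyword)
--     column_order = sorted(range(num_cols), key=lambda i: keyword[i])
--     return ''.join(combined[idx::num_cols] for idx in column_order)
-- ===== Notes on version B (the rewrite author's own statement) =====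
-- stated objective: simpler
-- what changed: Replaces the row-major grid plus nested column-reading loop (with its bounds check) by reading each column directly as a stride slice combined[idx::num_cols] of the flat string, and computes the column order by sorting indices by their keyword letter instead of sorting (letter, index) pairs and projecting.
import Mathlib
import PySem

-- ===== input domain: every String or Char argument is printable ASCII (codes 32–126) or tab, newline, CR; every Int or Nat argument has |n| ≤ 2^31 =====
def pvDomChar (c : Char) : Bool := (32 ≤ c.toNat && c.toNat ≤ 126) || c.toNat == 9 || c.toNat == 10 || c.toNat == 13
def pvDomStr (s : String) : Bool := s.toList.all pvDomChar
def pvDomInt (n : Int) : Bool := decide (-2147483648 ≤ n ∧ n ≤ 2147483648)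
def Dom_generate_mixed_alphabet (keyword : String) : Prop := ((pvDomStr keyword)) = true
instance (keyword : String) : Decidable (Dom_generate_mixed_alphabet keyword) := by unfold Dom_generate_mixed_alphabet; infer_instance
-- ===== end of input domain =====

-- B reads each column as a stride slice combined[idx::num_cols] instead of building a row-major
-- grid and scanning it with a bounds-checked nested loop (objective: simpler; same cost).

-- ===== PORT A =====
-- Helpers shared by BOTH Python sources (their first three lines are identical):
-- string.ascii_uppercase
def pvAZ : List Char := "ABCDEFGHIJKLMNOPQRSTUVWXYZ".toList
-- keyword = ''.join(sorted(set(keyword.upper()), key=keyword.index))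
-- ('.getD 0' is exact under Pre_: every element of the set then occurs in the original keyword,
--  so index? is 'some'; outside Pre_ Python raises ValueError)
def pvKey (kw : List Char) : List Char :=
  PySem.List.sorted (PySem.Set.ofList (PySem.Chars.upper kw))
    (fun c => (PySem.List.index? kw c).getD 0) false
-- combined = keyword + ''.join(sorted(set(string.ascii_uppercase) - set(keyword)))
def pvCombined (kw : List Char) : List Char :=
  pvKey kw ++
    PySem.List.sorted (PySem.Set.diff (PySem.Set.ofList pvAZ) (pvKey kw)) (fun c => c) false

def generate_mixed_alphabet (keyword : String) : String :=
  let kw := keyword.toList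
  let key := pvKey kw
  let combined := pvCombined kw
  let num_cols : Int := (key.length : Int)
  -- grid = [combined[i:i+num_cols] for i in range(0, len(combined), num_cols)]
  let grid : List (List Char) :=
    (PySem.List.pyRange 0 (combined.length : Int) num_cols).map
      (fun i => PySem.List.slice combined (some i) (some (i + num_cols)))
  -- keyword_order = sorted([(char, idx) for idx, char in enumerate(keyword)])
  let keyword_order :=
    PySem.List.sorted2 ((PySem.List.enumerate key).map (fun p => (p.2, p.1)))
      (fun p => p.1) (fun p => p.2) false
  let column_order := keyword_order.map (fun p => p.2)
  -- nested loop accumulating mixed_alphabet ('pyGetD … ' '' is exact: guarded by idx < len(row))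
  let mixed := column_order.foldl (fun acc idx =>
      grid.foldl (fun acc row =>
        if idx < (row.length : Int) then acc ++ [PySem.List.pyGetD row idx ' '] else acc) acc) []
  String.ofList mixed

-- ===== PORT B =====
def generate_mixed_alphabet_alt (keyword : String) : String :=
  let kw := keyword.toList
  let key := pvKey kw
  let combined := pvCombined kw
  let num_cols : Int := (key.length : Int)
  -- column_order = sorted(range(num_cols), key=lambda i: keyword[i])   ('pyGetD … ' '' exact: 0 ≤ i < len(key))
  let column_order :=
    PySem.List.sorted (PySem.List.pyRange 0 num_cols 1) (fun i => PySem.List.pyGetD key i ' ') false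
  -- ''.join(combined[idx::num_cols] for idx in column_order)
  -- ('.getD []' is exact under Pre_: num_cols ≥ 1 there; on num_cols = 0 Python raises ValueError)
  String.ofList (column_order.flatMap
    (fun idx => (PySem.List.slice? combined (some idx) none num_cols).getD []))

-- ===== PRECONDITION & SPEC =====
-- Pre_ = exactly the inputs where Python A returns: a nonempty keyword each of whose characters
-- has its uppercase form also present (otherwise keyword.index / range(…, 0) raises ValueError).
def Pre_generate_mixed_alphabet (keyword : String) : Prop :=
  keyword.toList ≠ [] ∧ (keyword.toList.all (fun c => c.toUpper ∈ keyword.toList)) = true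
instance (keyword : String) : Decidable (Pre_generate_mixed_alphabet keyword) := by
  unfold Pre_generate_mixed_alphabet; infer_instance
def pvWitness_generate_mixed_alphabet : String := "CRYPTO"

def Spec_generate_mixed_alphabet (keyword : String) (out : String) : Prop :=
  out = generate_mixed_alphabet_alt keyword
instance (keyword : String) (out : String) : Decidable (Spec_generate_mixed_alphabet keyword out) := by
  unfold Spec_generate_mixed_alphabet; infer_instance

-- ===== CLAIM (what is proved, stated in full; the proofs are below) =====
def Claim_equal_generate_mixed_alphabet : Prop :=
  ∀ (keyword : String), Dom_generate_mixed_alphabet keyword →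
    Pre_generate_mixed_alphabet keyword →
      Spec_generate_mixed_alphabet keyword (generate_mixed_alphabet keyword)

-- ===== LEMMAS AND PROOFS =====

-- insertBy only looks at 'before x y' for y already in the list
lemma insertBy_congr {α : Type} (b₁ b₂ : α → α → Bool) (x : α) (ys : List α)
    (h : ∀ y ∈ ys, b₁ x y = b₂ x y) :
    PySem.List.insertBy b₁ x ys = PySem.List.insertBy b₂ x ys := by
  induction ys with
  | nil => rfl
  | cons y ys ih =>
    simp only [PySem.List.insertBy, h y (by simp)]
    split
    · rfl
    · simp only [List.cons.injEq, true_and]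
      exact ih (fun z hz => h z (by simp [hz]))

lemma foldl_insertBy_congr {α : Type} (b₁ b₂ : α → α → Bool) (xs : List α)
    (h : ∀ a ∈ xs, ∀ b ∈ xs, b₁ a b = b₂ a b) :
    xs.foldl (fun acc x => PySem.List.insertBy b₁ x acc) [] =
      xs.foldl (fun acc x => PySem.List.insertBy b₂ x acc) [] := by
  have main : ∀ (l : List α) (acc : List α), (∀ a ∈ l, a ∈ xs) → (∀ a ∈ acc, a ∈ xs) →
      l.foldl (fun acc x => PySem.List.insertBy b₁ x acc) acc =
        l.foldl (fun acc x => PySem.List.insertBy b₂ x acc) acc := by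
    intro l
    induction l with
    | nil => intro acc _ _; rfl
    | cons x l ih =>
      intro acc hl hacc
      simp only [List.foldl_cons]
      rw [insertBy_congr b₁ b₂ x acc (fun y hy => h x (hl x (by simp)) y (hacc y hy))]
      exact ih _ (fun a ha => hl a (by simp [ha]))
        (fun a ha => by
          rcases (PySem.List.mem_insertBy b₂ x a acc).1 ha with rfl | ha
          · exact hl a (by simp)
          · exact hacc a ha)
  exact main xs [] (fun a ha => ha) (by simp)

-- when the primary key never ties (except trivially), the tuple sort is the plain sort by k1
lemma sorted2_eq_sorted {α κ₁ κ₂ : Type} [LinearOrder κ₁] [LinearOrder κ₂]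
    (xs : List α) (k1 : α → κ₁) (k2 : α → κ₂)
    (h : ∀ a ∈ xs, ∀ b ∈ xs, k1 a = k1 b → ¬ k2 a < k2 b) :
    PySem.List.sorted2 xs k1 k2 false = PySem.List.sorted xs k1 false := by
  simp only [PySem.List.sorted2, PySem.List.sorted, Bool.false_eq_true, if_false]
  apply foldl_insertBy_congr
  intro a ha b hb
  by_cases h1 : k1 a < k1 b
  · simp [h1]
  · by_cases h2 : k1 b < k1 a
    · simp [h1, h2]
    · have : k1 a = k1 b := le_antisymm (not_lt.1 h2) (not_lt.1 h1)
      simp [this, h a ha b hb this]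

-- (List.range G).filter (· < c) is an initial segment
lemma range_filter_lt (G c : Nat) :
    (List.range G).filter (fun k => decide (k < c)) = List.range (min c G) := by
  induction G with
  | zero => simp
  | succ G ih =>
    rw [List.range_succ, List.filter_append, ih]
    by_cases h : G < c
    · have : min c (G + 1) = min c G + 1 := by omega
      rw [this, List.range_succ]
      have : min c G = G := by omega
      simp [h, this]
    · have h1 : min c (G + 1) = min c G := by omega
      simp [h, h1]

-- k < ceil(M/n) iff n*k < M
lemma lt_ceil_iff (n M k : Nat) (hn : 1 ≤ n) (hM : 1 ≤ M) :
    k < (M + n - 1)/n ↔ n*k < M := by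
  rw [Nat.lt_iff_add_one_le, Nat.le_div_iff_mul_le (by omega : 0 < n), add_mul, one_mul,
    Nat.mul_comm k n]
  generalize n*k = t
  omega

-- the column A reads from the grid is the stride slice B takes
lemma column_eq (combined : List Char) (n j : Nat) (h1 : 1 ≤ n) (hj : j < n)
    (hn : n ≤ combined.length) :
    (((PySem.List.pyRange 0 (combined.length : Int) (n : Int)).map
        (fun i => PySem.List.slice combined (some i) (some (i + (n : Int))))).filter
          (fun row => decide ((j : Int) < (row.length : Int)))).map
        (fun row => PySem.List.pyGetD row (j : Int) ' ') =
      (PySem.List.slice? combined (some (j : Int)) none (n : Int)).getD [] := by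
  have hL1 : 1 ≤ combined.length := le_trans h1 hn
  have hn0 : ((n : Int)) ≠ 0 := by exact_mod_cast (by omega : n ≠ 0)
  have hcast : ∀ (a : Nat), (((a : Int)) / ((n : Int))).toNat = a / n := by
    intro a
    rw [← Int.natCast_div, Int.toNat_natCast]
  have hrange : PySem.List.pyRange 0 (combined.length : Int) (n : Int) =
      (List.range ((combined.length + n - 1)/n)).map (fun k => ((n*k : Nat) : Int)) := by
    simp only [PySem.List.pyRange]
    rw [if_neg hn0, if_pos (by exact_mod_cast h1), if_pos (by exact_mod_cast hL1)]
    have he : ((combined.length : Int) - 0 + (n : Int) - 1) = ((combined.length + n - 1 : Nat) : Int) := by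
      omega
    rw [he, hcast]
    exact List.map_congr_left (fun k _ => by push_cast; ring)
  have hRHS : (PySem.List.slice? combined (some (j : Int)) none (n : Int)).getD [] =
      (List.range ((combined.length - j + n - 1)/n)).map
        (fun k => combined.getD (j + n*k) ' ') := by
    have hjL : min ((j : Int)) ((combined.length : Int)) = (j : Int) :=
      min_eq_left (by exact_mod_cast le_of_lt (lt_of_lt_of_le hj hn))
    simp only [PySem.List.slice?, PySem.List.sliceIndices]
    rw [if_neg hn0]
    simp only [show ¬((n : Int) < 0) by omega, if_false,
      show ¬((j : Int) < 0) by omega, if_false, hjL,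
      show (0 : Int) < (n : Int) from by exact_mod_cast h1, if_true,
      show ((j : Int)) < ((combined.length : Int)) from by exact_mod_cast lt_of_lt_of_le hj hn, if_true]
    have he : ((combined.length : Int) - (j : Int) + (n : Int) - 1) =
        ((combined.length - j + n - 1 : Nat) : Int) := by
      omega
    rw [he, hcast, Option.getD_some]
    rw [List.filterMap_congr (g := fun k => (some ∘ fun k => combined.getD (j + n*k) ' ') k) ?_,
      List.filterMap_eq_map]
    intro k hk
    have hkc : k < (combined.length - j + n - 1)/n := List.mem_range.1 hk
    have hlt : j + n*k < combined.length := by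
      have := (lt_ceil_iff n (combined.length - j) k h1 (by omega)).1 hkc
      omega
    have ht : (((j : Int)) + ((n : Int)) * ((k : Int))).toNat = j + n*k := by
      omega
    simp only [Function.comp_def, ht]
    rw [List.getElem?_eq_getElem hlt, List.getD_eq_getElem?_getD, List.getElem?_eq_getElem hlt]
    rfl
  rw [hRHS, hrange, List.map_map, List.filter_map, List.map_map]
  simp only [Function.comp_def, PySem.List.slice_natCast_add]
  rw [List.filter_congr (q := fun k => decide (k < (combined.length - j + n - 1)/n)) ?_]
  · rw [range_filter_lt, Nat.min_eq_left (Nat.div_le_div_right (by omega))]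
    refine List.map_congr_left (fun k hk => ?_)
    have hkc : k < (combined.length - j + n - 1)/n := List.mem_range.1 hk
    have hlt : j + n*k < combined.length := by
      have := (lt_ceil_iff n (combined.length - j) k h1 (by omega)).1 hkc
      omega
    rw [PySem.List.pyGetD_natCast, List.getD_eq_getElem?_getD,
      List.getElem?_take_of_lt hj, List.getElem?_drop, List.getD_eq_getElem?_getD,
      Nat.add_comm (n*k) j]
  · intro k _
    simp only [List.length_take, List.length_drop]
    rw [decide_eq_decide, lt_ceil_iff n (combined.length - j) k h1 (by omega), Nat.cast_lt]
    generalize n*k = t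
    omega

-- A's column order equals B's
lemma order_eq (key : List Char) (hnd : key.Nodup) :
    ((PySem.List.sorted2 ((PySem.List.enumerate key).map (fun p => (p.2, p.1)))
        (fun p => p.1) (fun p => p.2) false).map (fun p => p.2)) =
      PySem.List.sorted (PySem.List.pyRange 0 (key.length : Int) 1)
        (fun i => PySem.List.pyGetD key i ' ') false := by
  have hf : ∀ (i : Int) (h0 : 0 ≤ i) (hl : i < (key.length : Int)),
      PySem.List.pyGetD key i ' ' = key[i.toNat]'(by omega) := by
    intro i h0 hl
    obtain ⟨m, rfl⟩ : ∃ m : Nat, i = (m : Int) := ⟨i.toNat, by omega⟩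
    have hm : m < key.length := by exact_mod_cast hl
    rw [PySem.List.pyGetD_natCast, List.getD_eq_getElem?_getD, List.getElem?_eq_getElem hm]
    simp
  have hinj : ∀ i ∈ PySem.List.pyRange 0 (key.length : Int) 1,
      ∀ j ∈ PySem.List.pyRange 0 (key.length : Int) 1,
      PySem.List.pyGetD key i ' ' = PySem.List.pyGetD key j ' ' → i = j := by
    intro i hi j hj he
    rcases (PySem.List.mem_pyRange_one).1 hi with ⟨hi0, hil⟩
    rcases (PySem.List.mem_pyRange_one).1 hj with ⟨hj0, hjl⟩
    rw [hf i hi0 hil, hf j hj0 hjl] at he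
    have := (List.Nodup.getElem_inj_iff hnd).1 he
    omega
  have hpairs : (PySem.List.enumerate key).map (fun p => (p.2, p.1)) =
      (PySem.List.pyRange 0 (key.length : Int) 1).map
        (fun i => (PySem.List.pyGetD key i ' ', i)) := by
    rw [PySem.List.enumerate_eq_map_pyRange key ' ']
    simp [List.map_map, Function.comp]
  have hSperm := PySem.List.sorted_perm (PySem.List.pyRange 0 (key.length : Int) 1)
    (fun i => PySem.List.pyGetD key i ' ') false
  have hSnodup : (PySem.List.sorted (PySem.List.pyRange 0 (key.length : Int) 1)
      (fun i => PySem.List.pyGetD key i ' ') false).Nodup :=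
    hSperm.nodup_iff.mpr (PySem.List.nodup_pyRange_one 0 _)
  have hSle := PySem.List.sorted_pairwise (PySem.List.pyRange 0 (key.length : Int) 1)
    (fun i => PySem.List.pyGetD key i ' ')
  have hSlt : (PySem.List.sorted (PySem.List.pyRange 0 (key.length : Int) 1)
      (fun i => PySem.List.pyGetD key i ' ') false).Pairwise
      (fun i j => PySem.List.pyGetD key i ' ' < PySem.List.pyGetD key j ' ') := by
    refine List.Pairwise.imp_of_mem ?_ (hSle.and hSnodup)
    intro a b ha hb hab
    refine lt_of_le_of_ne hab.1 (fun he => hab.2 ?_)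
    exact hinj a (hSperm.mem_iff.1 ha) b (hSperm.mem_iff.1 hb) he
  rw [hpairs]
  rw [sorted2_eq_sorted _ _ _ (by
    intro a ha b hb h1 h2
    rcases List.mem_map.1 ha with ⟨i, hi, rfl⟩
    rcases List.mem_map.1 hb with ⟨j, hj, rfl⟩
    have hij := hinj i hi j hj h1
    have h2' : i < j := h2
    omega)]
  rw [PySem.List.sorted_eq_of_perm_of_pairwise_lt _
      ((PySem.List.sorted (PySem.List.pyRange 0 (key.length : Int) 1)
        (fun i => PySem.List.pyGetD key i ' ') false).map
        (fun i => (PySem.List.pyGetD key i ' ', i)))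
      (fun p => p.1) (hSperm.map _) (List.pairwise_map.mpr hSlt)]
  rw [List.map_map]
  exact List.map_id' _

lemma key_nodup (kw : List Char) : (pvKey kw).Nodup := by
  have h := PySem.List.sorted_perm (PySem.Set.ofList (PySem.Chars.upper kw))
    (fun c => (PySem.List.index? kw c).getD 0) false
  exact h.nodup_iff.mpr (PySem.Set.nodup_ofList _)

lemma key_len_le (kw : List Char) : (pvKey kw).length ≤ (pvCombined kw).length := by
  simp [pvCombined]

-- ===== VERDICT (by name: the statement is the Claim_ definition above) =====
theorem generate_mixed_alphabet_spec : Claim_equal_generate_mixed_alphabet := by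
  intro keyword _ hPre
  obtain ⟨hkw, -⟩ := hPre
  have hkey_ne : pvKey keyword.toList ≠ [] := by
    rw [pvKey, Ne, PySem.List.sorted_eq_nil_iff]
    intro hofl
    obtain ⟨c, hc⟩ := List.exists_mem_of_ne_nil _ hkw
    have hmem : PySem.Chars.upperChar c ∈ PySem.Set.ofList (PySem.Chars.upper keyword.toList) :=
      (PySem.Set.mem_ofList _ _).2 (List.mem_map_of_mem hc)
    rw [hofl] at hmem
    exact absurd hmem (List.not_mem_nil)
  have hn1 : 1 ≤ (pvKey keyword.toList).length := List.length_pos_of_ne_nil hkey_ne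
  have hnle := key_len_le keyword.toList
  unfold Spec_generate_mixed_alphabet
  simp only [generate_mixed_alphabet, generate_mixed_alphabet_alt]
  apply congrArg String.ofList
  rw [order_eq _ (key_nodup _)]
  rw [PySem.List.foldl_congr_mem _ _
    (fun acc idx => acc ++ (PySem.List.slice? (pvCombined keyword.toList) (some idx) none
      ((pvKey keyword.toList).length : Int)).getD []) _ ?_]
  · rw [PySem.List.foldl_append_eq_flatMap]
    rfl
  · intro acc idx hidx
    have hmem := (PySem.List.sorted_perm _ _ _).mem_iff.1 hidx
    rcases (PySem.List.mem_pyRange_one).1 hmem with ⟨h0, hl⟩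
    obtain ⟨j, rfl⟩ : ∃ m : Nat, idx = (m : Int) := ⟨idx.toNat, by omega⟩
    have hj : j < (pvKey keyword.toList).length := by exact_mod_cast hl
    rw [PySem.List.foldl_append_ite (p := fun row : List Char => ((j : Int) < (row.length : Int)))
      (f := fun row => PySem.List.pyGetD row (j : Int) ' ')]
    rw [column_eq (pvCombined keyword.toList) (pvKey keyword.toList).length j hn1 hj hnle]
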